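-- pv_equiv track=rewrite | github.com/mariakainat2025/Contrastive-learning-methodology | extract_windows.py | _dfs_from_seed
-- ===== SOURCE A (Python) =====
-- def _dfs_from_seed(seed, adj, node_pool, max_nodes, max_depth):
--     """DFS from a process seed node.
--     """
--     visited  = set()
--     node_set = set()
--     stack    = [(seed, 0)]          # (node_uuid, current_depth)
--
--     while stack and len(node_set) < max_nodes:
--         node, depth = stack.pop()
--         if node in visited or node not in node_pool:
--             continue
--         visited.add(node)
--         node_set.add(node)
--
--         if depth < max_depth:
--             for nb in sorted(adj.get(node, ())):
--                 if nb not in visited and nb in node_pool: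
--                     stack.append((nb, depth + 1))
--
--     return frozenset(node_set)
-- ===== SOURCE B (Python) =====
-- def _dfs_from_seed(seed, adj, node_pool, max_nodes, max_depth):
--     """Recursive DFS: the explicit stack is replaced by call recursion over the
--     eligible neighbors in descending order (mirroring the LIFO pop order)."""
--     visited  = set()
--     node_set = set()
--
--     def dfs(node, depth):
--         if len(node_set) >= max_nodes or node in visited or node not in node_pool:
--             return
--         visited.add(node)
--         node_set.add(node)
--         if depth < max_depth:
--             children = [nb for nb in reversed(sorted(adj.get(node, ())))
--                         if nb not in visited and nb in node_pool]
--             for nb in children: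
--                 dfs(nb, depth + 1)
--
--     dfs(seed, 0)
--     return frozenset(node_set)
-- ===== Notes on version B (the rewrite author's own statement) =====
-- stated objective: alternative
-- what changed: Replaces A's explicit stack / while loop by a recursive dfs helper that mutates shared visited/node_set sets, recursing over the eligible neighbors in descending order to mirror the stack's LIFO pop order.
import Mathlib
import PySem

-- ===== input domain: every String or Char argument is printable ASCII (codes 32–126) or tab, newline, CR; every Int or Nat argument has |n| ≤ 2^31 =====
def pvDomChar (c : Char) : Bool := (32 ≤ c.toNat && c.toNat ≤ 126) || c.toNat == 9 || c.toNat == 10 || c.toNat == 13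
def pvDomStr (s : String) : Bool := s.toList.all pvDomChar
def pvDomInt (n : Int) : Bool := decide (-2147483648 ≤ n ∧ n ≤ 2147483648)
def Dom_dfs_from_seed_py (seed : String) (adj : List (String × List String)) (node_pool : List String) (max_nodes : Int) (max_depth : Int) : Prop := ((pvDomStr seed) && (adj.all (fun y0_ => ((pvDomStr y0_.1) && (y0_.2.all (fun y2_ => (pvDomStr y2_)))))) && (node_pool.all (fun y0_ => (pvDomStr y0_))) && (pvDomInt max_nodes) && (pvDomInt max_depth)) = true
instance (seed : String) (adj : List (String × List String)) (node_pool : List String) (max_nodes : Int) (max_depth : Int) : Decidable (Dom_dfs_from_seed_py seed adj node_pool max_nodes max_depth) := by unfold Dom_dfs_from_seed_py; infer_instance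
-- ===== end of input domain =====

-- B replaces A's explicit stack/while loop by call recursion over the eligible
-- neighbors in descending order (mirroring the LIFO pop order); objective:
-- alternative decomposition, same cost.

-- adj.get(node, ()) — first-match association-list lookup (the dict parameter convention)
def pyGetAdj (adj : List (String × List String)) (node : String) : List String :=
  ((adj.find? (fun p => p.1 == node)).map Prod.snd).getD []

-- Shared fuel bound for the two ports, a totality device only: A pops at most
-- 1 + (sum of adjacency-list lengths) times, and B enters at most that many calls.
def pvFuel (adj : List (String × List String)) (node_pool : List String) : Nat :=
  node_pool.length + adj.foldl (fun a p => a + p.2.length) 0 + 2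

-- ===== PORT A =====
-- the while loop of A; one fuel unit per pop
def loopA (adj : List (String × List String)) (node_pool : List String)
    (max_nodes max_depth : Int) :
    Nat → PySem.Set String → PySem.Set String → List (String × Int) → List String
  | _, _, ns, [] => ns
  | 0, _, ns, _ :: _ => ns
  | f + 1, v, ns, (node, depth) :: rest =>
    if ¬((ns.length : Int) < max_nodes) then ns
    else if PySem.Set.contains v node = true ∨ node_pool.contains node = false then
      loopA adj node_pool max_nodes max_depth f v ns rest
    else
      let v' := PySem.Set.add v node
      let ns' := PySem.Set.add ns node
      let st' :=
        if depth < max_depth then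
          (PySem.List.sorted (pyGetAdj adj node) (fun x => x) false).foldl
            (fun st nb =>
              if (!(PySem.Set.contains v' nb) && node_pool.contains nb) = true then
                (nb, depth + 1) :: st
              else st) rest
        else rest
      loopA adj node_pool max_nodes max_depth f v' ns' st'

def dfs_from_seed_py (seed : String) (adj : List (String × List String)) (node_pool : List String) (max_nodes : Int) (max_depth : Int) : List String :=
  loopA adj node_pool max_nodes max_depth (pvFuel adj node_pool)
    PySem.Set.empty PySem.Set.empty [(seed, 0)]

-- ===== PORT B =====
-- the recursive dfs of B (dfsListB is its for loop); one fuel unit per call entered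
mutual
def dfsB (adj : List (String × List String)) (node_pool : List String)
    (max_nodes max_depth : Int) :
    Nat → PySem.Set String × PySem.Set String → String → Int →
      Nat × (PySem.Set String × PySem.Set String)
  | 0, st, _, _ => (0, st)
  | f + 1, (v, ns), node, depth =>
    if max_nodes ≤ (ns.length : Int) ∨ PySem.Set.contains v node = true ∨ node_pool.contains node = false then
      (f, (v, ns))
    else
      let v' := PySem.Set.add v node
      let ns' := PySem.Set.add ns node
      if depth < max_depth then
        dfsListB adj node_pool max_nodes max_depth f (v', ns')
          ((PySem.List.sorted (pyGetAdj adj node) (fun x => x) false).reverse.filter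
            (fun nb => !(PySem.Set.contains v' nb) && node_pool.contains nb)) (depth + 1)
      else (f, (v', ns'))
termination_by f _ _ _ => (f, 0)
decreasing_by simp [Prod.lex_iff]

def dfsListB (adj : List (String × List String)) (node_pool : List String)
    (max_nodes max_depth : Int) :
    Nat → PySem.Set String × PySem.Set String → List String → Int →
      Nat × (PySem.Set String × PySem.Set String)
  | f, st, [], _ => (f, st)
  | f, st, nb :: rest, depth =>
    let r := dfsB adj node_pool max_nodes max_depth f st nb depth
    dfsListB adj node_pool max_nodes max_depth (min r.1 f) r.2 rest depth
termination_by f _ l _ => (f, l.length + 1)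
decreasing_by
  all_goals simp [Prod.lex_iff]
  all_goals omega
end

def dfs_from_seed_py_alt (seed : String) (adj : List (String × List String)) (node_pool : List String) (max_nodes : Int) (max_depth : Int) : List String :=
  (dfsB adj node_pool max_nodes max_depth (pvFuel adj node_pool)
    (PySem.Set.empty, PySem.Set.empty) seed 0).2.2

-- ===== PRECONDITION & SPEC =====
def Spec_dfs_from_seed_py (seed : String) (adj : List (String × List String)) (node_pool : List String) (max_nodes : Int) (max_depth : Int) (out : List String) : Prop := out = dfs_from_seed_py_alt seed adj node_pool max_nodes max_depth
instance (seed : String) (adj : List (String × List String)) (node_pool : List String) (max_nodes : Int) (max_depth : Int) (out : List String) : Decidable (Spec_dfs_from_seed_py seed adj node_pool max_nodes max_depth out) := by unfold Spec_dfs_from_seed_py; infer_instance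

-- ===== CLAIM (what is proved, stated in full; the proofs are below) =====
def Claim_equal_dfs_from_seed_py : Prop := ∀ (seed : String) (adj : List (String × List String)) (node_pool : List String) (max_nodes : Int) (max_depth : Int), Dom_dfs_from_seed_py seed adj node_pool max_nodes max_depth → Spec_dfs_from_seed_py seed adj node_pool max_nodes max_depth (dfs_from_seed_py seed adj node_pool max_nodes max_depth)

-- ===== LEMMAS AND PROOFS =====

-- proof-side: fold dfsB over a whole (node, depth) stack, threading the fuel like dfsListB
def runStack (adj : List (String × List String)) (node_pool : List String)
    (max_nodes max_depth : Int) :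
    Nat → PySem.Set String × PySem.Set String → List (String × Int) →
      Nat × (PySem.Set String × PySem.Set String)
  | f, st, [] => (f, st)
  | f, st, (n, d) :: rest =>
    let r := dfsB adj node_pool max_nodes max_depth f st n d
    runStack adj node_pool max_nodes max_depth (min r.1 f) r.2 rest

theorem dfsB_skip (adj : List (String × List String)) (node_pool : List String)
    (max_nodes max_depth : Int) (f : Nat) (v ns : PySem.Set String) (n : String) (d : Int)
    (h : max_nodes ≤ (ns.length : Int) ∨ PySem.Set.contains v n = true ∨ node_pool.contains n = false) :
    dfsB adj node_pool max_nodes max_depth (f + 1) (v, ns) n d = (f, (v, ns)) := by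
  rw [dfsB.eq_2, if_pos h]

theorem dfsB_state_cap (adj : List (String × List String)) (node_pool : List String)
    (max_nodes max_depth : Int) (f : Nat) (v ns : PySem.Set String) (n : String) (d : Int)
    (h : ¬((ns.length : Int) < max_nodes)) :
    (dfsB adj node_pool max_nodes max_depth f (v, ns) n d).2 = (v, ns) := by
  cases f with
  | zero => rw [dfsB.eq_1]
  | succ f => rw [dfsB_skip adj node_pool max_nodes max_depth f v ns n d (Or.inl (not_lt.mp h))]

theorem runStack_cap (adj : List (String × List String)) (node_pool : List String)
    (max_nodes max_depth : Int) (v ns : PySem.Set String)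
    (h : ¬((ns.length : Int) < max_nodes)) :
    ∀ (l : List (String × Int)) (f : Nat),
      (runStack adj node_pool max_nodes max_depth f (v, ns) l).2 = (v, ns) := by
  intro l
  induction l with
  | nil => intro f; simp [runStack]
  | cons hd tl ih =>
    intro f
    obtain ⟨n, d⟩ := hd
    have hst := dfsB_state_cap adj node_pool max_nodes max_depth f v ns n d h
    simp only [runStack]
    rw [hst]
    exact ih _

theorem runStack_zero (adj : List (String × List String)) (node_pool : List String)
    (max_nodes max_depth : Int) (st : PySem.Set String × PySem.Set String) :
    ∀ (l : List (String × Int)),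
      runStack adj node_pool max_nodes max_depth 0 st l = (0, st) := by
  intro l
  induction l with
  | nil => simp [runStack]
  | cons hd tl ih => obtain ⟨n, d⟩ := hd; simp [runStack, dfsB.eq_1, ih]

theorem runStack_fuel_le (adj : List (String × List String)) (node_pool : List String)
    (max_nodes max_depth : Int) :
    ∀ (l : List (String × Int)) (f : Nat) (st : PySem.Set String × PySem.Set String),
      (runStack adj node_pool max_nodes max_depth f st l).1 ≤ f := by
  intro l
  induction l with
  | nil => intro f st; simp [runStack]
  | cons hd tl ih =>
    intro f st
    obtain ⟨n, d⟩ := hd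
    simp only [runStack]
    exact le_trans (ih _ _) (Nat.min_le_right _ _)

theorem runStack_append (adj : List (String × List String)) (node_pool : List String)
    (max_nodes max_depth : Int) :
    ∀ (l1 l2 : List (String × Int)) (f : Nat) (st : PySem.Set String × PySem.Set String),
      runStack adj node_pool max_nodes max_depth f st (l1 ++ l2)
        = runStack adj node_pool max_nodes max_depth
            (runStack adj node_pool max_nodes max_depth f st l1).1
            (runStack adj node_pool max_nodes max_depth f st l1).2 l2 := by
  intro l1
  induction l1 with
  | nil => intro l2 f st; simp [runStack]
  | cons hd tl ih =>
    intro l2 f st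
    obtain ⟨n, d⟩ := hd
    simp only [List.cons_append, runStack]
    exact ih _ _ _

theorem dfsListB_eq_runStack (adj : List (String × List String)) (node_pool : List String)
    (max_nodes max_depth : Int) :
    ∀ (l : List String) (d : Int) (f : Nat) (st : PySem.Set String × PySem.Set String),
      dfsListB adj node_pool max_nodes max_depth f st l d
        = runStack adj node_pool max_nodes max_depth f st (l.map (fun nb => (nb, d))) := by
  intro l
  induction l with
  | nil => intro d f st; simp [dfsListB.eq_1, runStack]
  | cons hd tl ih =>
    intro d f st
    rw [List.map_cons, dfsListB.eq_2]
    simp only [runStack]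
    exact ih _ _ _

theorem foldl_push (p : String → Bool) (d1 : Int) :
    ∀ (lst : List String) (rest : List (String × Int)),
      lst.foldl (fun st nb => if p nb = true then (nb, d1) :: st else st) rest
        = ((lst.filter p).reverse.map (fun nb => (nb, d1))) ++ rest := by
  intro lst
  induction lst with
  | nil => intro rest; simp
  | cons hd tl ih =>
    intro rest
    by_cases h : p hd = true
    · simp [List.foldl_cons, h, ih]
    · simp [List.foldl_cons, h, ih]

theorem loopA_eq_runStack (adj : List (String × List String)) (node_pool : List String)
    (max_nodes max_depth : Int) :
    ∀ (f : Nat) (v ns : PySem.Set String) (stack : List (String × Int)),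
      loopA adj node_pool max_nodes max_depth f v ns stack
        = (runStack adj node_pool max_nodes max_depth f (v, ns) stack).2.2 := by
  intro f
  induction f with
  | zero =>
    intro v ns stack
    cases stack with
    | nil => simp [loopA, runStack]
    | cons hd rest =>
      obtain ⟨n, d⟩ := hd
      simp [loopA, runStack_zero]
  | succ f ih =>
    intro v ns stack
    cases stack with
    | nil => simp [loopA, runStack]
    | cons hd rest =>
      obtain ⟨n, d⟩ := hd
      by_cases hcap : ((ns.length : Int) < max_nodes)
      · by_cases hskip : (PySem.Set.contains v n = true ∨ node_pool.contains n = false)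
        · -- node already visited or not in pool
          simp only [loopA, if_neg (not_not_intro hcap), if_pos hskip, runStack,
            dfsB_skip adj node_pool max_nodes max_depth f v ns n d (Or.inr hskip)]
          rw [Nat.min_eq_left (Nat.le_succ f)]
          exact ih v ns rest
        · -- visit the node
          have hguard : ¬(max_nodes ≤ ((ns.length : Int)) ∨ PySem.Set.contains v n = true ∨ node_pool.contains n = false) := by
            push Not at hskip ⊢
            exact ⟨hcap, hskip.1, hskip.2⟩
          simp only [loopA, if_neg (not_not_intro hcap), if_neg hskip, runStack, dfsB.eq_2,
            if_neg hguard]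
          by_cases hd1 : d < max_depth
          · simp only [if_pos hd1]
            rw [foldl_push, ih, dfsListB_eq_runStack, ← List.filter_reverse, runStack_append]
            rw [Nat.min_eq_left (le_trans
              (runStack_fuel_le adj node_pool max_nodes max_depth _ _ _) (Nat.le_succ f))]
          · simp only [if_neg hd1]
            rw [ih, Nat.min_eq_left (Nat.le_succ f)]
      · -- cap reached: every remaining call is a no-op on the state
        simp only [loopA, runStack]
        rw [if_pos hcap,
          dfsB_state_cap adj node_pool max_nodes max_depth (f + 1) v ns n d hcap,
          runStack_cap adj node_pool max_nodes max_depth v ns hcap]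

-- ===== VERDICT (by name: the statement is the Claim_ definition above) =====
theorem dfs_from_seed_py_spec : Claim_equal_dfs_from_seed_py := by
  intro seed adj node_pool max_nodes max_depth _
  unfold Spec_dfs_from_seed_py dfs_from_seed_py dfs_from_seed_py_alt
  rw [loopA_eq_runStack]
  simp [runStack]
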